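-- pv_equiv track=rewrite | github.com/Ivoah/AdventofCode | 2016/AoC7.py | ssl
-- ===== SOURCE A (Python) =====
-- def ssl(ip):
--     in_bracket = False
--     abas = []
--     babs = []
--     for i in range(len(ip)):
--         if ip[i] == '[':
--             in_bracket = True
--         elif ip[i] == ']':
--             in_bracket = False
--         try:
--             if ip[i] == ip[i+2] and ip[i] != ip[i+1]:
--                 if in_bracket:
--                     babs.append(ip[i:i+3])
--                     for aba in abas:
--                         for bab in babs:
--                             if aba and aba[0] == bab[1] and aba[1] == bab[0]:
--                                 return True
--                 else:
--                     abas.append(ip[i:i+3])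
--                     for aba in abas:
--                         for bab in babs:
--                             if bab and aba[0] == bab[1] and aba[1] == bab[0]:
--                                 return True
--         except IndexError:
--             return False
--
--     return False
-- ===== SOURCE B (Python) =====
-- def ssl(ip):
--     in_bracket = False
--     supernet = set()
--     hypernet = set()
--     for i in range(len(ip) - 2):
--         c = ip[i]
--         if c == '[':
--             in_bracket = True
--         elif c == ']':
--             in_bracket = False
--         if c == ip[i + 2] and c != ip[i + 1]:
--             if in_bracket:
--                 hypernet.add((c, ip[i + 1]))
--             else:
--                 supernet.add((c, ip[i + 1]))
--     return any((b, a) in hypernet for (a, b) in supernet)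
-- ===== Notes on version B (the rewrite author's own statement) =====
-- stated objective: faster
-- what changed: Replaces the rescan of all ABA x BAB string pairs after every append (and string slicing) with a single pass that stores char pairs in two sets and does one reversed-pair membership check at the end.
import Mathlib
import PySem

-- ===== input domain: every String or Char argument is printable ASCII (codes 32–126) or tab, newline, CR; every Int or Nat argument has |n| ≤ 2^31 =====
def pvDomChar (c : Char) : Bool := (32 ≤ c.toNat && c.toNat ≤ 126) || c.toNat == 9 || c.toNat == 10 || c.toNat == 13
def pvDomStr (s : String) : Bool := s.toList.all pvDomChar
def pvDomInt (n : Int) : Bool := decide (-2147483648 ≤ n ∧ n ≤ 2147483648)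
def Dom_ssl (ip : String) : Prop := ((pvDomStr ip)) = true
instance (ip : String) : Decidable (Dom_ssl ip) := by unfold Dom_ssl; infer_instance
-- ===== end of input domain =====

-- B replaces A's rescan of all stored ABA×BAB slices after every append with one pass
-- collecting char pairs into two sets and a single reversed-pair membership check (objective: faster).

-- the identical "if c == '[': in_bracket = True / elif c == ']': in_bracket = False"
-- update both sources perform
def bracketState (c : Char) (inb : Bool) : Bool :=
  if c == '[' then true else if c == ']' then false else inb

-- ===== PORT A =====
-- 'aba and aba[0] == bab[1] and aba[1] == bab[0]' (resp. the branch guarded by 'bab'):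
-- every stored slice has length 3, so the truthiness guard and the four indexings
-- are exactly this pattern match on both branches.
def sslHit (aba bab : List Char) : Bool :=
  match aba, bab with
  | a0 :: a1 :: _, b0 :: b1 :: _ => a0 == b1 && a1 == b0
  | _, _ => false

-- the nested 'for aba in abas: for bab in babs: if …: return True'
def sslScan (abas babs : List (List Char)) : Bool :=
  abas.any (fun aba => babs.any (fun bab => sslHit aba bab))

def sslGo (cs : List Char) (i : Nat) (inb : Bool) (abas babs : List (List Char)) : Bool :=
  if h : i < cs.length then
    let c := cs[i]
    let inb := bracketState c inb
    match PySem.List.pyGet? cs ((i : Int) + 2) with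
    | none => false      -- IndexError on ip[i+2], caught: return False
    | some c2 =>
      if c == c2 then
        match PySem.List.pyGet? cs ((i : Int) + 1) with
        | none => false  -- IndexError on ip[i+1], caught (unreachable: i+2 was in range)
        | some c1 =>
          if c != c1 then
            if inb then
              let babs' := babs ++ [PySem.List.slice cs (some (i : Int)) (some ((i : Int) + 3))]
              if sslScan abas babs' then true
              else sslGo cs (i + 1) inb abas babs'
            else
              let abas' := abas ++ [PySem.List.slice cs (some (i : Int)) (some ((i : Int) + 3))]
              if sslScan abas' babs then true
              else sslGo cs (i + 1) inb abas' babs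
          else sslGo cs (i + 1) inb abas babs
      else sslGo cs (i + 1) inb abas babs
  else false
termination_by cs.length - i

def ssl (ip : String) : Bool := sslGo ip.toList 0 false [] []

-- ===== PORT B =====
def sslAltGo (cs : List Char) (i : Nat) (inb : Bool)
    (sup hyp : PySem.Set (Char × Char)) :
    PySem.Set (Char × Char) × PySem.Set (Char × Char) :=
  if h : i + 2 < cs.length then
    let c := cs[i]
    let inb := bracketState c inb
    if c == cs[i + 2] && c != cs[i + 1] then
      if inb then sslAltGo cs (i + 1) inb sup (PySem.Set.add hyp (c, cs[i + 1]))
      else sslAltGo cs (i + 1) inb (PySem.Set.add sup (c, cs[i + 1])) hyp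
    else sslAltGo cs (i + 1) inb sup hyp
  else (sup, hyp)
termination_by cs.length - i

-- 'any((b, a) in hypernet for (a, b) in supernet)' — order-independent consumption of the set
def sslCross (sup hyp : PySem.Set (Char × Char)) : Bool :=
  sup.any (fun p => PySem.Set.contains hyp (p.2, p.1))

def ssl_alt (ip : String) : Bool :=
  let cs := ip.toList
  let r := sslAltGo cs 0 false PySem.Set.empty PySem.Set.empty
  sslCross r.1 r.2

-- ===== PRECONDITION & SPEC =====
def Spec_ssl (ip : String) (out : Bool) : Prop := out = ssl_alt ip
instance (ip : String) (out : Bool) : Decidable (Spec_ssl ip out) := by unfold Spec_ssl; infer_instance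

-- ===== CLAIM (what is proved, stated in full; the proofs are below) =====
def Claim_equal_ssl : Prop := ∀ (ip : String), Dom_ssl ip → Spec_ssl ip (ssl ip)

-- ===== LEMMAS AND PROOFS =====

-- the char pair an ABA/BAB slice contributes
def pairOf? (s : List Char) : Option (Char × Char) :=
  match s with
  | a :: b :: _ => some (a, b)
  | _ => none

def pairsOf (l : List (List Char)) : List (Char × Char) := l.filterMap pairOf?

lemma sslHit_iff (aba bab : List Char) :
    sslHit aba bab = true ↔
      ∃ a b, pairOf? aba = some (a, b) ∧ pairOf? bab = some (b, a) := by
  rcases aba with _ | ⟨a0, _ | ⟨a1, t⟩⟩ <;> rcases bab with _ | ⟨b0, _ | ⟨b1, u⟩⟩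
  all_goals simp [sslHit, pairOf?]
  constructor
  · rintro ⟨h1, h2⟩; exact ⟨h2.symm, h1.symm⟩
  · rintro ⟨h1, h2⟩; exact ⟨h2.symm, h1.symm⟩

lemma sslScan_iff (abas babs : List (List Char)) :
    sslScan abas babs = true ↔
      ∃ q : Char × Char, q ∈ pairsOf abas ∧ (q.2, q.1) ∈ pairsOf babs := by
  simp only [sslScan, List.any_eq_true, sslHit_iff, pairsOf, List.mem_filterMap]
  constructor
  · rintro ⟨aba, ha, bab, hb, a, b, hpa, hpb⟩
    exact ⟨(a, b), ⟨aba, ha, hpa⟩, ⟨bab, hb, hpb⟩⟩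
  · rintro ⟨⟨a, b⟩, ⟨aba, ha, hpa⟩, ⟨bab, hb, hpb⟩⟩
    exact ⟨aba, ha, bab, hb, a, b, hpa, hpb⟩

lemma sslCross_iff (sup hyp : PySem.Set (Char × Char)) :
    sslCross sup hyp = true ↔ ∃ q : Char × Char, q ∈ sup ∧ (q.2, q.1) ∈ hyp := by
  simp only [sslCross, List.any_eq_true]
  constructor
  · rintro ⟨p, hp, hc⟩
    exact ⟨p, hp, (PySem.Set.contains_iff hyp _).mp hc⟩
  · rintro ⟨p, hp, hc⟩
    exact ⟨p, hp, (PySem.Set.contains_iff hyp _).mpr hc⟩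

lemma cross_eq_scan (abas babs : List (List Char)) (sup hyp : PySem.Set (Char × Char))
    (hs : ∀ q, q ∈ pairsOf abas ↔ q ∈ sup) (hh : ∀ q, q ∈ pairsOf babs ↔ q ∈ hyp) :
    sslCross sup hyp = sslScan abas babs := by
  rw [Bool.eq_iff_iff, sslCross_iff, sslScan_iff]
  constructor
  · rintro ⟨q, h1, h2⟩; exact ⟨q, (hs q).mpr h1, (hh _).mpr h2⟩
  · rintro ⟨q, h1, h2⟩; exact ⟨q, (hs q).mp h1, (hh _).mp h2⟩

-- sslAltGo only ever adds elements to its two sets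
lemma sslAltGo_mono (cs : List Char) :
    ∀ (n i : Nat) (inb : Bool) (sup hyp : PySem.Set (Char × Char)),
      cs.length ≤ i + n →
      (∀ q ∈ sup, q ∈ (sslAltGo cs i inb sup hyp).1) ∧
      (∀ q ∈ hyp, q ∈ (sslAltGo cs i inb sup hyp).2) := by
  intro n
  induction n with
  | zero =>
    intro i inb sup hyp hn
    rw [sslAltGo]
    have : ¬ (i + 2 < cs.length) := by omega
    simp [this]
  | succ m ih =>
    intro i inb sup hyp hn
    rw [sslAltGo]
    by_cases h2 : i + 2 < cs.length
    · simp only [dif_pos h2]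
      have hn' : cs.length ≤ (i + 1) + m := by omega
      by_cases hc : (cs[i] == cs[i + 2] && cs[i] != cs[i + 1]) = true
      · simp only [hc, if_true]
        by_cases hb : bracketState cs[i] inb = true
        · simp only [hb, if_true]
          obtain ⟨m1, m2⟩ := ih (i + 1) (bracketState cs[i] inb) sup
            (PySem.Set.add hyp (cs[i], cs[i + 1])) hn'
          rw [hb] at m1 m2
          exact ⟨m1, fun q hq => m2 q ((PySem.Set.mem_add _ _ _).mpr (Or.inl hq))⟩
        · simp only [Bool.not_eq_true] at hb
          simp only [hb, Bool.false_eq_true, if_false]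
          obtain ⟨m1, m2⟩ := ih (i + 1) (bracketState cs[i] inb)
            (PySem.Set.add sup (cs[i], cs[i + 1])) hyp hn'
          rw [hb] at m1 m2
          exact ⟨fun q hq => m1 q ((PySem.Set.mem_add _ _ _).mpr (Or.inl hq)), m2⟩
      · simp only [Bool.not_eq_true] at hc
        simp only [hc, Bool.false_eq_true, if_false]
        exact ih (i + 1) _ _ _ hn'
    · simp [h2]

-- the length-3 slice ip[i:i+3]
lemma slice_three (cs : List Char) (i : Nat) (h : i + 2 < cs.length) :
    PySem.List.slice cs (some (i : Int)) (some ((i : Int) + 3)) =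
      [cs[i], cs[i + 1], cs[i + 2]] := by
  have h3 : ((i : Int) + 3) = (((i + 3 : Nat)) : Int) := by push_cast; ring
  rw [h3, PySem.List.slice_natCast]
  have h33 : i + 3 - i = 3 := by omega
  have hi : i < cs.length := by omega
  have h1 : i + 1 < cs.length := by omega
  rw [h33, List.drop_eq_getElem_cons hi, List.drop_eq_getElem_cons h1,
    List.drop_eq_getElem_cons h]
  rfl

lemma pairsOf_append_slice (abas : List (List Char)) (a b c : Char) :
    pairsOf (abas ++ [[a, b, c]]) = pairsOf abas ++ [(a, b)] := by
  simp [pairsOf, pairOf?]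

-- main invariant: as long as no cross-match has been found yet, A's remaining loop
-- returns exactly the final membership test of B's remaining loop
lemma sslGo_eq_cross (cs : List Char) :
    ∀ (n i : Nat) (inb : Bool) (abas babs : List (List Char))
      (sup hyp : PySem.Set (Char × Char)),
      cs.length ≤ i + n →
      (∀ q, q ∈ pairsOf abas ↔ q ∈ sup) →
      (∀ q, q ∈ pairsOf babs ↔ q ∈ hyp) →
      sslScan abas babs = false →
      sslGo cs i inb abas babs =
        sslCross (sslAltGo cs i inb sup hyp).1 (sslAltGo cs i inb sup hyp).2 := by
  intro n
  induction n with
  | zero =>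
    intro i inb abas babs sup hyp hn hs hh hscan
    rw [sslGo, sslAltGo]
    have hi : ¬ (i < cs.length) := by omega
    have h2 : ¬ (i + 2 < cs.length) := by omega
    simp only [dif_neg hi, dif_neg h2]
    rw [cross_eq_scan abas babs sup hyp hs hh, hscan]
  | succ m ih =>
    intro i inb abas babs sup hyp hn hs hh hscan
    by_cases hi : i < cs.length
    · rw [sslGo, sslAltGo]
      simp only [dif_pos hi]
      by_cases h2 : i + 2 < cs.length
      · have hcast2 : ((i : Int) + 2) = (((i + 2 : Nat)) : Int) := by push_cast; ring
        have hcast1 : ((i : Int) + 1) = (((i + 1 : Nat)) : Int) := by push_cast; ring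
        have h1 : i + 1 < cs.length := by omega
        have e2 : PySem.List.pyGet? cs ((i : Int) + 2) = some cs[i + 2] := by
          rw [hcast2, PySem.List.pyGet?_natCast, List.getElem?_eq_getElem h2]
        have e1 : PySem.List.pyGet? cs ((i : Int) + 1) = some cs[i + 1] := by
          rw [hcast1, PySem.List.pyGet?_natCast, List.getElem?_eq_getElem h1]
        simp only [e2, e1, dif_pos h2]
        have hn' : cs.length ≤ (i + 1) + m := by omega
        by_cases hc2 : (cs[i] == cs[i + 2]) = true
        · by_cases hc1 : (cs[i] != cs[i + 1]) = true
          · have hcc : (cs[i] == cs[i + 2] && cs[i] != cs[i + 1]) = true := by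
              simp [hc2, hc1]
            simp only [hc2, hc1, Bool.and_self, if_true, slice_three cs i h2]
            by_cases hb : bracketState cs[i] inb = true
            · simp only [hb, if_true]
              have hh' : ∀ q, q ∈ pairsOf (babs ++ [[cs[i], cs[i + 1], cs[i + 2]]]) ↔
                  q ∈ PySem.Set.add hyp (cs[i], cs[i + 1]) := by
                intro q
                rw [pairsOf_append_slice, PySem.Set.mem_add]
                simp [hh q]
              by_cases hsc : sslScan abas (babs ++ [[cs[i], cs[i + 1], cs[i + 2]]]) = true
              · simp only [hsc, if_true]
                obtain ⟨q, hq1, hq2⟩ := (sslScan_iff _ _).mp hsc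
                obtain ⟨m1, m2⟩ := sslAltGo_mono cs m (i + 1) (bracketState cs[i] inb) sup
                  (PySem.Set.add hyp (cs[i], cs[i + 1])) hn'
                rw [hb] at m1 m2
                symm
                rw [sslCross_iff]
                exact ⟨q, m1 q ((hs q).mp hq1), m2 _ ((hh' _).mp hq2)⟩
              · rw [Bool.not_eq_true] at hsc
                simp only [hsc, Bool.false_eq_true, if_false]
                exact ih (i + 1) _ _ _ _ _ hn' hs hh' hsc
            · rw [Bool.not_eq_true] at hb
              simp only [hb, Bool.false_eq_true, if_false]
              have hs' : ∀ q, q ∈ pairsOf (abas ++ [[cs[i], cs[i + 1], cs[i + 2]]]) ↔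
                  q ∈ PySem.Set.add sup (cs[i], cs[i + 1]) := by
                intro q
                rw [pairsOf_append_slice, PySem.Set.mem_add]
                simp [hs q]
              by_cases hsc : sslScan (abas ++ [[cs[i], cs[i + 1], cs[i + 2]]]) babs = true
              · simp only [hsc, if_true]
                obtain ⟨q, hq1, hq2⟩ := (sslScan_iff _ _).mp hsc
                obtain ⟨m1, m2⟩ := sslAltGo_mono cs m (i + 1) (bracketState cs[i] inb)
                  (PySem.Set.add sup (cs[i], cs[i + 1])) hyp hn'
                rw [hb] at m1 m2
                symm
                rw [sslCross_iff]
                exact ⟨q, m1 q ((hs' q).mp hq1), m2 _ ((hh (q.2, q.1)).mp hq2)⟩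
              · rw [Bool.not_eq_true] at hsc
                simp only [hsc, Bool.false_eq_true, if_false]
                exact ih (i + 1) _ _ _ _ _ hn' hs' hh hsc
          · rw [Bool.not_eq_true] at hc1
            simp only [hc2, hc1, Bool.and_false, Bool.false_eq_true, if_false, if_true]
            exact ih (i + 1) _ _ _ _ _ hn' hs hh hscan
        · rw [Bool.not_eq_true] at hc2
          simp only [hc2, Bool.false_and, Bool.false_eq_true, if_false]
          exact ih (i + 1) _ _ _ _ _ hn' hs hh hscan
      · have e2 : PySem.List.pyGet? cs ((i : Int) + 2) = none := by
          have hcast2 : ((i : Int) + 2) = (((i + 2 : Nat)) : Int) := by push_cast; ring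
          rw [hcast2, PySem.List.pyGet?_natCast]
          simp [List.getElem?_eq_none (by omega : cs.length ≤ i + 2)]
        simp only [e2, dif_neg h2]
        rw [cross_eq_scan abas babs sup hyp hs hh, hscan]
    · rw [sslGo, sslAltGo]
      have h2 : ¬ (i + 2 < cs.length) := by omega
      simp only [dif_neg hi, dif_neg h2]
      rw [cross_eq_scan abas babs sup hyp hs hh, hscan]

-- ===== VERDICT (by name: the statement is the Claim_ definition above) =====
theorem ssl_spec : Claim_equal_ssl := by
  intro ip _
  unfold Spec_ssl ssl ssl_alt
  exact sslGo_eq_cross ip.toList ip.toList.length 0 false [] [] _ _ (by omega)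
    (by simp [pairsOf, PySem.Set.empty]) (by simp [pairsOf, PySem.Set.empty])
    (by simp [sslScan])
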